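-- pv_equiv track=rewrite | github.com/flautodipan/Python_Libraries | funzionante-tot/lib_Experimentum.py | Unpack_Fit
-- ===== SOURCE A (Python) =====
-- def Unpack_Fit(fit):
--
--     non_fitted   =   ()
--     accomplished =   ()
--     exceded      =   ()
--     fitted       =   ()
--
--     for (what, (ii,jj)) in fit:
--
--         if  what == 0:
--
--             non_fitted  =    non_fitted +   ((ii,jj),)
--
--         elif what == 1:
--
--             accomplished      =   accomplished  +   ((ii,jj),)
--             fitted            =   fitted + ((ii,jj),)
--
--         elif what == 2:
--
--             exceded      =   exceded  +   ((ii,jj),)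
--             fitted            =   fitted + ((ii,jj),)
--
--     return (non_fitted, accomplished, exceded, fitted)
-- ===== SOURCE B (Python) =====
-- def Unpack_Fit(fit):
--     items = tuple(fit)
--     non_fitted   = tuple((ii, jj) for (what, (ii, jj)) in items if what == 0)
--     accomplished = tuple((ii, jj) for (what, (ii, jj)) in items if what == 1)
--     exceded      = tuple((ii, jj) for (what, (ii, jj)) in items if what == 2)
--     fitted       = tuple((ii, jj) for (what, (ii, jj)) in items if what in (1, 2))
--     return (non_fitted, accomplished, exceded, fitted)
-- ===== Notes on version B (the rewrite author's own statement) =====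
-- stated objective: idiomatic
-- what changed: Replaces the single classifying loop that grows four tuples by repeated concatenation with four independent filtering comprehensions over a materialised input.
import Mathlib
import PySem

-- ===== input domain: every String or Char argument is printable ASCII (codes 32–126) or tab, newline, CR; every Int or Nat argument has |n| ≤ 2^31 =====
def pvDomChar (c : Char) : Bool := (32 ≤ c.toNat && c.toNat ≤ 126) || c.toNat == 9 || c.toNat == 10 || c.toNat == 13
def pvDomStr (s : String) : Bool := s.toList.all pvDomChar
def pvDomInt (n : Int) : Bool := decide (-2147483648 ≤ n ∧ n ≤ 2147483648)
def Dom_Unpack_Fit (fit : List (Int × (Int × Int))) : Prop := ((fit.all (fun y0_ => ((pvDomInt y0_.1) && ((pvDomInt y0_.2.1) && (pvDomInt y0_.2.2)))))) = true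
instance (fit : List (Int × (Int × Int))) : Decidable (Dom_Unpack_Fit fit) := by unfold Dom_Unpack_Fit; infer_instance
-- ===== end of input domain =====

-- B replaces A's single classifying loop (quadratic tuple concatenation) with four independent filter passes.


-- ===== PORT A =====
-- literal port of A: one fold over fit carrying the four accumulators, appending at the end
def Unpack_Fit (fit : List (Int × (Int × Int))) : (List (Int × Int)) × (List (Int × Int)) × (List (Int × Int)) × (List (Int × Int)) :=
  let st := fit.foldl (fun (st : (List (Int × Int)) × (List (Int × Int)) × (List (Int × Int)) × (List (Int × Int))) p =>
    let what := p.1; let ii := p.2.1; let jj := p.2.2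
    let nf := st.1; let ac := st.2.1; let ex := st.2.2.1; let ft := st.2.2.2
    if what = 0 then (nf ++ [(ii, jj)], ac, ex, ft)
    else if what = 1 then (nf, ac ++ [(ii, jj)], ex, ft ++ [(ii, jj)])
    else if what = 2 then (nf, ac, ex ++ [(ii, jj)], ft ++ [(ii, jj)])
    else st) ([], [], [], [])
  st

-- ===== PORT B =====
-- port of B: four independent filter+map passes
def Unpack_Fit_alt (fit : List (Int × (Int × Int))) : (List (Int × Int)) × (List (Int × Int)) × (List (Int × Int)) × (List (Int × Int)) :=
  ((fit.filter (fun p => p.1 = 0)).map (fun p => p.2),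
   (fit.filter (fun p => p.1 = 1)).map (fun p => p.2),
   (fit.filter (fun p => p.1 = 2)).map (fun p => p.2),
   (fit.filter (fun p => p.1 = 1 ∨ p.1 = 2)).map (fun p => p.2))

-- ===== PRECONDITION & SPEC =====
def Spec_Unpack_Fit (fit : List (Int × (Int × Int))) (out : (List (Int × Int)) × (List (Int × Int)) × (List (Int × Int)) × (List (Int × Int))) : Prop := out = Unpack_Fit_alt fit
instance (fit : List (Int × (Int × Int))) (out : (List (Int × Int)) × (List (Int × Int)) × (List (Int × Int)) × (List (Int × Int))) : Decidable (Spec_Unpack_Fit fit out) := by unfold Spec_Unpack_Fit; infer_instance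

-- ===== CLAIM (what is proved, stated in full; the proofs are below) =====
def Claim_equal_Unpack_Fit : Prop := ∀ (fit : List (Int × (Int × Int))), Dom_Unpack_Fit fit → Spec_Unpack_Fit fit (Unpack_Fit fit)

-- ===== LEMMAS AND PROOFS =====
-- loop invariant: the fold from any accumulator state appends B's four filtered lists
theorem Unpack_Fit_fold_inv (fit : List (Int × (Int × Int)))
    (nf ac ex ft : List (Int × Int)) :
    fit.foldl (fun (st : (List (Int × Int)) × (List (Int × Int)) × (List (Int × Int)) × (List (Int × Int))) p =>
      let what := p.1; let ii := p.2.1; let jj := p.2.2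
      let nf := st.1; let ac := st.2.1; let ex := st.2.2.1; let ft := st.2.2.2
      if what = 0 then (nf ++ [(ii, jj)], ac, ex, ft)
      else if what = 1 then (nf, ac ++ [(ii, jj)], ex, ft ++ [(ii, jj)])
      else if what = 2 then (nf, ac, ex ++ [(ii, jj)], ft ++ [(ii, jj)])
      else st) (nf, ac, ex, ft)
    = (nf ++ (fit.filter (fun p => p.1 = 0)).map (fun p => p.2),
       ac ++ (fit.filter (fun p => p.1 = 1)).map (fun p => p.2),
       ex ++ (fit.filter (fun p => p.1 = 2)).map (fun p => p.2),
       ft ++ (fit.filter (fun p => p.1 = 1 ∨ p.1 = 2)).map (fun p => p.2)) := by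
  induction fit generalizing nf ac ex ft with
  | nil => simp
  | cons h t ih =>
      obtain ⟨w, i, j⟩ := h
      by_cases h0 : w = 0
      · simp [List.foldl, h0, ih, List.filter]
      · by_cases h1 : w = 1
        · simp [List.foldl, h1, ih, List.filter]
        · by_cases h2 : w = 2
          · simp [List.foldl, h0, h2, ih, List.filter]
          · simp [List.foldl, h0, h1, h2, ih, List.filter]

-- ===== VERDICT (by name: the statement is the Claim_ definition above) =====
theorem Unpack_Fit_spec : Claim_equal_Unpack_Fit := by
  intro fit _
  show Unpack_Fit fit = Unpack_Fit_alt fit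
  simp [Unpack_Fit, Unpack_Fit_alt, Unpack_Fit_fold_inv fit [] [] [] []]
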